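-- pv_equiv track=rewrite | github.com/MinaAlmasi/inner-speech-MEG | src/utils/classify_fns.py | combine_triggers
-- ===== SOURCE A (Python) =====
-- def combine_triggers(y, combine):
--     '''
--     Combine triggers for analysis across conditions
--     '''
--     y_combined = y.copy()
--
--     for pair in combine:
--         combine_pair = int(str(pair[0]) + str(pair[1]))
--         for i, trigger in enumerate(y_combined):
--             if trigger in pair:
--                 y_combined[i] = combine_pair
--
--     return y_combined
-- ===== SOURCE B (Python) =====
-- def combine_triggers(y, combine):
--     '''
--     Combine triggers for analysis across conditions
--     '''
--     # Build, in one backward pass over the pairs, the final value each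
--     # trigger value ends up as after all pairs are applied in order,
--     # then remap y in a single pass.
--     mapping = {}
--     for a, b in reversed(combine):
--         c = int(str(a) + str(b))
--         t = mapping.get(c, c)
--         mapping[a] = t
--         mapping[b] = t
--     return [mapping.get(v, v) for v in y]
-- ===== Notes on version B (the rewrite author's own statement) =====
-- stated objective: faster
-- what changed: Instead of rewriting the whole list once per pair, B builds a final-value dictionary in one backward pass over the pairs (chaining merges through later pairs) and remaps y in a single pass.
import Mathlib
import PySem

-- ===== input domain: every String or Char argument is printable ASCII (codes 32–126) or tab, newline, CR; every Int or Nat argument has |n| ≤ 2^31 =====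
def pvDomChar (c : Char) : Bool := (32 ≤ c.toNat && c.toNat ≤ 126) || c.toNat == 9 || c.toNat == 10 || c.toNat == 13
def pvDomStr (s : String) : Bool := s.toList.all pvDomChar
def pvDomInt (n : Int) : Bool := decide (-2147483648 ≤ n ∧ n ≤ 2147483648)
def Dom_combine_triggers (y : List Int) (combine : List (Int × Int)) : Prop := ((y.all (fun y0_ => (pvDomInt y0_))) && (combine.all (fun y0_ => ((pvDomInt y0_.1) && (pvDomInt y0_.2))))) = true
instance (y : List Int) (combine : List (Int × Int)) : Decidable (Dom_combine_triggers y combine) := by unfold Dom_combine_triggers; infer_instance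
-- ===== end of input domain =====

-- B merges each pair of trigger values into int(str(a)+str(b)) via one backward-built
-- dictionary and a single pass over y, instead of A's rewrite of the whole list per pair.

-- ===== PORT A =====
-- combine_pair = int(str(pair[0]) + str(pair[1])); Python raises ValueError when the
-- concatenation is not an int literal (pair[1] < 0) — those inputs are outside Pre_,
-- where this helper's `.getD 0` is never reached with a `none`.
def pvComb (p : Int × Int) : Int :=
  (PySem.Int.ofStr? (PySem.Int.toStr p.1 ++ PySem.Int.toStr p.2)).getD 0

def combine_triggers (y : List Int) (combine : List (Int × Int)) : List Int :=
  combine.foldl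
    (fun y_combined pair =>
      let combine_pair := pvComb pair
      -- for i, trigger in enumerate(y_combined): if trigger in pair: y_combined[i] = combine_pair
      y_combined.map (fun trigger =>
        if trigger = pair.1 ∨ trigger = pair.2 then combine_pair else trigger))
    y

-- ===== PORT B =====
def combine_triggers_alt (y : List Int) (combine : List (Int × Int)) : List Int :=
  let mapping :=
    combine.reverse.foldl
      (fun m p =>
        let c := pvComb p
        let t := m.getD c c
        (m.insert p.1 t).insert p.2 t)
      (PySem.Dict.empty : PySem.Dict Int Int)
  y.map (fun v => mapping.getD v v)

-- ===== PRECONDITION & SPEC =====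
-- Excluded: pairs whose second component is negative — there int(str(a)+str(b)) sees
-- e.g. "1-2" and Python A raises ValueError (B's Python raises identically).
def Pre_combine_triggers (y : List Int) (combine : List (Int × Int)) : Prop :=
  ∀ p ∈ combine, 0 ≤ p.2
instance (y : List Int) (combine : List (Int × Int)) : Decidable (Pre_combine_triggers y combine) := by
  unfold Pre_combine_triggers; infer_instance

def pvWitness_combine_triggers : List Int × (List (Int × Int)) := ([1, 2, 5, 2], [(1, 2), (12, 5)])

def Spec_combine_triggers (y : List Int) (combine : List (Int × Int)) (out : List Int) : Prop :=
  out = combine_triggers_alt y combine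
instance (y : List Int) (combine : List (Int × Int)) (out : List Int) : Decidable (Spec_combine_triggers y combine out) := by
  unfold Spec_combine_triggers; infer_instance

-- ===== CLAIM (what is proved, stated in full; the proofs are below) =====
def Claim_equal_combine_triggers : Prop := ∀ (y : List Int) (combine : List (Int × Int)), Dom_combine_triggers y combine → Pre_combine_triggers y combine → Spec_combine_triggers y combine (combine_triggers y combine)

-- ===== LEMMAS AND PROOFS =====

-- The value a single trigger ends up as after all pairs are applied in order.
def pvChain : List (Int × Int) → Int → Int
  | [], v => v
  | p :: ps, v => pvChain ps (if v = p.1 ∨ v = p.2 then pvComb p else v)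

theorem combine_triggers_eq_map_chain (combine : List (Int × Int)) (y : List Int) :
    combine_triggers y combine = y.map (pvChain combine) := by
  induction combine generalizing y with
  | nil => simp [combine_triggers, pvChain]
  | cons p ps ih =>
      simp only [combine_triggers, List.foldl_cons] at *
      rw [ih, List.map_map]
      rfl

theorem getD_build_eq_chain (combine : List (Int × Int)) (v : Int) :
    ((combine.reverse.foldl
        (fun m p =>
          let c := pvComb p
          let t := m.getD c c
          (m.insert p.1 t).insert p.2 t)
        (PySem.Dict.empty : PySem.Dict Int Int)).getD v v)
      = pvChain combine v := by
  induction combine generalizing v with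
  | nil => simp [pvChain, PySem.Dict.getD_empty]
  | cons p ps ih =>
      simp only [List.foldl_reverse] at ih
      simp only [List.reverse_cons, List.foldl_append, List.foldl_cons, List.foldl_nil,
        List.foldl_reverse, pvChain]
      rw [PySem.Dict.getD_insert, PySem.Dict.getD_insert]
      by_cases h2 : v = p.2
      · simp [h2, ih]
      · by_cases h1 : v = p.1
        · simp [h1, h2, ih]
        · simp [h1, h2, ih]

-- ===== VERDICT (by name: the statement is the Claim_ definition above) =====
theorem combine_triggers_spec : Claim_equal_combine_triggers := by
  intro y combine _ _
  unfold Spec_combine_triggers combine_triggers_alt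
  rw [combine_triggers_eq_map_chain]
  exact List.map_congr_left (fun v _ => (getD_build_eq_chain combine v).symm)
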